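-- pv_equiv track=rewrite | github.com/ifEricReturnTrue/ECE444-F2023-Assignment1 | utils.py | reversed
-- ===== SOURCE A (Python) =====
-- def reversed(num):
--     num_list=[]
--     neg = False
--     result = 0
--     if num < 0:
--         neg = True
--         num = num * -1
--     while num != 0:
--         num_list.append(num%10)
--         num = num // 10
--     for i in range (len(num_list)):
--         result = result + num_list[i] * (10**(len(num_list) - i - 1))
--     if neg == True:
--             result = result*-1
--     return result
-- ===== SOURCE B (Python) =====
-- def _rev_weight(n):
--     # returns (decimal reversal of n, 10 ** number_of_digits(n)) for n >= 0
--     if n == 0: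
--         return (0, 1)
--     r, w = _rev_weight(n // 10)
--     return ((n % 10) * w + r, w * 10)
--
-- def reversed(num):
--     if num < 0:
--         return -reversed(-num)
--     return _rev_weight(num)[0]
-- ===== Notes on version B (the rewrite author's own statement) =====
-- stated objective: alternative
-- what changed: Replaced A's two passes (build a digit list, then sum each digit times a recomputed power of ten) with a single top-down recursion carrying a (reversal, weight) pair, and handled the sign by recursing on -num instead of a neg flag.
import Mathlib
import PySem

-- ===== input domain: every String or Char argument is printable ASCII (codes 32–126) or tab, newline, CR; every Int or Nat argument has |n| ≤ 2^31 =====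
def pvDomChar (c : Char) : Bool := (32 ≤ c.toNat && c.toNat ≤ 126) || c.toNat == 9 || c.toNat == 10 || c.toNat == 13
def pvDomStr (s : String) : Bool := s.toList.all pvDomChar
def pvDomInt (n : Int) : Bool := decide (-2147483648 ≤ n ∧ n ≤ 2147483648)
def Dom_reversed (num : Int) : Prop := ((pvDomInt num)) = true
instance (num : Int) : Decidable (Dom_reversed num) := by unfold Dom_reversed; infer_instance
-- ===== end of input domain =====

-- B replaces A's two passes (digit list, then power-weighted sum) with one top-down
-- recursion carrying a (reversal, weight) pair; sign handled by recursing on -num.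

-- ===== PORT A =====
-- A's while loop, collecting digits; guard '0 < num' instead of 'num ≠ 0' only for
-- totality (the Python loop runs with num ≥ 0, where the two are equivalent for progress).
def pvDigitsA (num : Int) (acc : List Int) : List Int :=
  if _h : 0 < num then
    pvDigitsA (PySem.Int.floordiv num 10) (acc ++ [PySem.Int.mod num 10])
  else acc
termination_by num.toNat
decreasing_by
  have : PySem.Int.floordiv num 10 = num / 10 := PySem.Int.floordiv_eq_ediv_of_pos (by omega)
  rw [this]; omega

def reversed (num : Int) : Int :=
  let neg : Bool := num < 0
  let num := if num < 0 then num * -1 else num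
  let num_list := pvDigitsA num []
  -- for i in range(len(num_list)): result += num_list[i] * 10**(len-i-1)
  -- exponent len-1-i as a Nat equals Python's len-i-1 since 0 ≤ i < len in the range
  let result := (PySem.List.pyRange 0 num_list.length 1).foldl
      (fun result i =>
        result + PySem.List.pyGetD num_list i 0 * 10 ^ (num_list.length - 1 - i.toNat)) 0
  if neg then result * -1 else result

-- ===== PORT B =====
-- Source B's _rev_weight; guard '0 < n' instead of Python's 'n == 0' base case only for
-- totality (it is called with n ≥ 0, where the two coincide).
def pvRevWeight (n : Int) : Int × Int :=
  if _h : 0 < n then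
    let p := pvRevWeight (PySem.Int.floordiv n 10)
    (PySem.Int.mod n 10 * p.2 + p.1, p.2 * 10)
  else (0, 1)
termination_by n.toNat
decreasing_by
  have : PySem.Int.floordiv n 10 = n / 10 := PySem.Int.floordiv_eq_ediv_of_pos (by omega)
  rw [this]; omega

def reversed_alt (num : Int) : Int :=
  if num < 0 then -(reversed_alt (-num))
  else (pvRevWeight num).1
termination_by (if num < 0 then 1 else 0)
decreasing_by simp_all; omega

-- ===== PRECONDITION & SPEC =====
def Spec_reversed (num : Int) (out : Int) : Prop := out = reversed_alt num
instance (num : Int) (out : Int) : Decidable (Spec_reversed num out) := by unfold Spec_reversed; infer_instance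

-- ===== CLAIM =====
def Claim_equal_reversed : Prop := ∀ (num : Int), Dom_reversed num → Spec_reversed num (reversed num)

-- ===== LEMMAS AND PROOFS =====

-- place value of a digit list, least-significant digit first weighted highest (= the reversal)
def pvS : List Int → Int
  | [] => 0
  | d :: L => d * 10 ^ L.length + pvS L

theorem pvDigitsA_acc (num : Int) (acc : List Int) :
    pvDigitsA num acc = acc ++ pvDigitsA num [] := by
  by_cases h : 0 < num
  · conv_lhs => rw [pvDigitsA]
    conv_rhs => rw [pvDigitsA]
    simp only [h, dite_true]
    rw [pvDigitsA_acc (PySem.Int.floordiv num 10) (acc ++ [PySem.Int.mod num 10]),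
        pvDigitsA_acc (PySem.Int.floordiv num 10) ([] ++ [PySem.Int.mod num 10])]
    simp
  · conv_lhs => rw [pvDigitsA]
    conv_rhs => rw [pvDigitsA]
    simp [h]
termination_by num.toNat
decreasing_by
  all_goals
    have : PySem.Int.floordiv num 10 = num / 10 := PySem.Int.floordiv_eq_ediv_of_pos (by omega)
    rw [this]; omega

theorem pvDigitsA_cons (num : Int) (h : 0 < num) :
    pvDigitsA num [] = PySem.Int.mod num 10 :: pvDigitsA (PySem.Int.floordiv num 10) [] := by
  rw [pvDigitsA]
  simp only [h, dite_true, List.nil_append]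
  rw [pvDigitsA_acc]
  rfl

theorem pvRevWeight_eq (n : Int) :
    pvRevWeight n = (pvS (pvDigitsA n []), 10 ^ (pvDigitsA n []).length) := by
  by_cases h : 0 < n
  · rw [pvRevWeight]
    simp only [h, dite_true]
    rw [pvRevWeight_eq (PySem.Int.floordiv n 10), pvDigitsA_cons n h]
    simp [pvS, pow_succ]
  · rw [pvRevWeight, pvDigitsA]
    simp [h, pvS]
termination_by n.toNat
decreasing_by
  have : PySem.Int.floordiv n 10 = n / 10 := PySem.Int.floordiv_eq_ediv_of_pos (by omega)
  rw [this]; omega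

theorem pvFold_eq_pvS (l : List Int) (acc : Int) :
    (PySem.List.pyRange 0 l.length 1).foldl
      (fun r i => r + PySem.List.pyGetD l i 0 * 10 ^ (l.length - 1 - i.toNat)) acc
    = acc + pvS l := by
  induction l generalizing acc with
  | nil => simp [pvS]
  | cons d L ih =>
    have hcons : PySem.List.pyRange 0 ((d :: L).length : Int) 1
        = 0 :: PySem.List.pyRange 1 ((d :: L).length : Int) 1 := by
      apply PySem.List.pyRange_one_cons
      simp
    rw [hcons]
    simp only [List.foldl_cons]
    have hshift : PySem.List.pyRange 1 ((d :: L).length : Int) 1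
        = (PySem.List.pyRange 0 (L.length : Int) 1).map (fun i => i + 1) := by
      rw [PySem.List.pyRange_one, PySem.List.pyRange_one]
      have h1 : (((d :: L).length : Int) - 1).toNat = L.length := by
        simp
      have h2 : (((L.length : Int)) - 0).toNat = L.length := by omega
      rw [h1, h2, List.map_map]
      refine List.map_congr_left ?_
      intro k _
      simp [Function.comp]
      ring
    rw [hshift, List.foldl_map]
    have hbody : ∀ (r i : Int), i ∈ PySem.List.pyRange 0 (L.length : Int) 1 →
        r + PySem.List.pyGetD (d :: L) (i + 1) 0 * 10 ^ ((d :: L).length - 1 - (i + 1).toNat)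
        = r + PySem.List.pyGetD L i 0 * 10 ^ (L.length - 1 - i.toNat) := by
      intro r i hi
      rw [PySem.List.mem_pyRange_one] at hi
      obtain ⟨hi0, hil⟩ := hi
      have hk : i = (i.toNat : Int) := (Int.toNat_of_nonneg hi0).symm
      have h1 : PySem.List.pyGetD (d :: L) (i + 1) 0 = PySem.List.pyGetD L i 0 := by
        rw [hk]
        have hcast : ((i.toNat : Int) + 1) = ((i.toNat + 1 : Nat) : Int) := by push_cast; ring
        rw [hcast, PySem.List.pyGetD_natCast, PySem.List.pyGetD_natCast]
        simp
      have h2 : (d :: L).length - 1 - (i + 1).toNat = L.length - 1 - i.toNat := by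
        simp [List.length_cons]
        omega
      rw [h1, h2]
    rw [PySem.List.foldl_congr_mem _ _ _ _ hbody, ih]
    have hget0 : PySem.List.pyGetD (d :: L) 0 0 = d := by
      have : (0 : Int) = ((0 : Nat) : Int) := rfl
      rw [this, PySem.List.pyGetD_natCast]; rfl
    rw [hget0]
    simp [pvS]
    ring

-- ===== VERDICT =====
theorem reversed_spec : Claim_equal_reversed := by
  intro num _
  unfold Spec_reversed reversed
  simp only []
  by_cases h : num < 0
  · rw [reversed_alt]
    simp only [h, if_true]
    rw [reversed_alt]
    have h2 : ¬ (-num < 0) := by omega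
    simp only [h2, if_false]
    rw [pvRevWeight_eq, pvFold_eq_pvS]
    have : num * -1 = -num := by ring
    rw [this]
    simp
  · rw [reversed_alt]
    simp only [h, if_false]
    rw [pvRevWeight_eq, pvFold_eq_pvS]
    simp
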